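-- pv_equiv track=rewrite | github.com/samiaghezal/nau-sql | nc_gq/qg_to_prisma.py | parse_gql_schema
-- ===== SOURCE A (Python) =====
-- def convert_gql_type_to_prisma(gql_type: str) -> str:
--     """Convert GraphQL types to Prisma types."""
--     type_mapping = {
--         'String': 'String',
--         'Int': 'Int',
--         'Float': 'Float',
--         'Boolean': 'Boolean',
--         'ID': 'String @id',
--         'DateTime': 'DateTime',
--         'JSONString': 'Json',
--         'Decimal': 'Decimal',
--         'Upload': 'String',  # Simplified mapping for file uploads
--     }
--     return type_mapping.get(gql_type, 'String')  # Default to String if type not found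
--
-- def parse_gql_schema(schema_content: str) -> str:
--     """Parse GraphQL schema and convert to Prisma schema."""
--     prisma_schema = []
--     current_type = None
--     lines = schema_content.split('\n')
--
--     # Add Prisma schema header
--     prisma_schema.append('generator client {\n  provider = "prisma-client-js"\n}\n')
--     prisma_schema.append('datasource db {\n  provider = "postgresql"\n  url = env("DATABASE_URL")\n}\n')
--
--     for line in lines:
--         line = line.strip()
--
--         # Skip empty lines and comments
--         if not line or line.startswith('"""'):
--             continue
--
--         # Handle type definitions
--         if line.startswith('type ') and ' implements ' in line:
--             type_name = line.split(' implements ')[0].replace('type ', '').strip()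
--             current_type = f'model {type_name} {{'
--             prisma_schema.append(current_type)
--
--         elif line.startswith('type '):
--             type_name = line.replace('type ', '').replace(' {', '').strip()
--             current_type = f'model {type_name} {{'
--             prisma_schema.append(current_type)
--
--         # Handle enum definitions
--         elif line.startswith('enum '):
--             enum_name = line.replace('enum ', '').replace(' {', '').strip()
--             current_type = f'enum {enum_name} {{'
--             prisma_schema.append(current_type)
--
--         # Handle fields
--         elif current_type and line.strip() and not line.startswith('}'):
--             # Remove descriptions and directives
--             if '"""' in line or '@' in line:
--                 continue
--
--             field_parts = line.split(':')
--             if len(field_parts) == 2: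
--                 field_name = field_parts[0].strip()
--                 field_type = field_parts[1].strip().rstrip('!')
--
--                 # Handle list types
--                 if field_type.startswith('[') and field_type.endswith(']'):
--                     inner_type = field_type[1:-1].rstrip('!')
--                     prisma_type = convert_gql_type_to_prisma(inner_type)
--                     prisma_field = f'  {field_name} {prisma_type}[]'
--                 else:
--                     prisma_type = convert_gql_type_to_prisma(field_type)
--                     required = '!' in field_parts[1]
--                     prisma_field = f'  {field_name} {prisma_type}'
--                     if not required:
--                         prisma_field += '?'
--
--                 prisma_schema.append(prisma_field)
--
--         # Handle closing braces
--         elif line.startswith('}'):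
--             prisma_schema.append('}')
--             current_type = None
--             prisma_schema.append('')  # Add empty line between models
--
--     return '\n'.join(prisma_schema)
-- ===== SOURCE B (Python) =====
-- # Two-pass rewrite: pass 1 scans lines into structured tokens, pass 2 renders them.
-- def convert_gql_type_to_prisma(gql_type: str) -> str:
--     """Convert GraphQL types to Prisma types."""
--     type_mapping = {
--         'String': 'String',
--         'Int': 'Int',
--         'Float': 'Float',
--         'Boolean': 'Boolean',
--         'ID': 'String @id',
--         'DateTime': 'DateTime',
--         'JSONString': 'Json',
--         'Decimal': 'Decimal',
--         'Upload': 'String',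
--     }
--     return type_mapping.get(gql_type, 'String')
--
-- def _scan_line(line, open_type):
--     """Tokenize one stripped line; returns (tokens, new open_type flag)."""
--     if not line or line.startswith('"""'):
--         return [], open_type
--     if line.startswith('type ') and ' implements ' in line:
--         return [('model', line.split(' implements ')[0].replace('type ', '').strip())], True
--     if line.startswith('type '):
--         return [('model', line.replace('type ', '').replace(' {', '').strip())], True
--     if line.startswith('enum '):
--         return [('enum', line.replace('enum ', '').replace(' {', '').strip())], True
--     if open_type and line.strip() and not line.startswith('}'):
--         if '"""' in line or '@' in line:
--             return [], open_type
--         parts = line.split(':')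
--         if len(parts) != 2:
--             return [], open_type
--         name = parts[0].strip()
--         ftype = parts[1].strip().rstrip('!')
--         if ftype.startswith('[') and ftype.endswith(']'):
--             return [('list', name, ftype[1:-1].rstrip('!'))], open_type
--         return [('scalar', name, ftype, '!' in parts[1])], open_type
--     if line.startswith('}'):
--         return [('close',)], False
--     return [], open_type
--
-- def _render(tok):
--     """Render one token into its output lines."""
--     kind = tok[0]
--     if kind == 'model':
--         return ['model %s {' % tok[1]]
--     if kind == 'enum':
--         return ['enum %s {' % tok[1]]
--     if kind == 'list':
--         return ['  %s %s[]' % (tok[1], convert_gql_type_to_prisma(tok[2]))]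
--     if kind == 'scalar':
--         field = '  %s %s' % (tok[1], convert_gql_type_to_prisma(tok[2]))
--         return [field if tok[3] else field + '?']
--     return ['}', '']
--
-- def parse_gql_schema(schema_content: str) -> str:
--     """Parse GraphQL schema and convert to Prisma schema."""
--     tokens = []
--     open_type = False
--     for raw in schema_content.split('\n'):
--         new_tokens, open_type = _scan_line(raw.strip(), open_type)
--         tokens += new_tokens
--     out = ['generator client {\n  provider = "prisma-client-js"\n}\n',
--            'datasource db {\n  provider = "postgresql"\n  url = env("DATABASE_URL")\n}\n']
--     for tok in tokens:
--         out += _render(tok)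
--     return '\n'.join(out)
-- ===== Notes on version B (the rewrite author's own statement) =====
-- stated objective: alternative
-- what changed: A's single loop that interleaves parsing and output-string building is split into two passes: a scanner that turns each stripped line into structured tokens (model/enum/list-field/scalar-field/close) while tracking whether a type is open, and a separate renderer that maps the token stream to the output lines.
import Mathlib
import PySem

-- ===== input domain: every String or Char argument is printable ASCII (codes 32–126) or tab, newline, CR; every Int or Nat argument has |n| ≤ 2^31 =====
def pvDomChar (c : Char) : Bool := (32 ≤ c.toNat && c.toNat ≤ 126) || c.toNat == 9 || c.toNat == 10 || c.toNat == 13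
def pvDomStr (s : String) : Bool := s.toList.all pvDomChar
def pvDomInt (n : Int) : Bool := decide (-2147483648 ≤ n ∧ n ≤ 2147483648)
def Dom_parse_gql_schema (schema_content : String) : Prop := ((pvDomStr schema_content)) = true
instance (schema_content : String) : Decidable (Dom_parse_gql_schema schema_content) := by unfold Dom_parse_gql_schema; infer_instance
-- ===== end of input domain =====

-- B re-decomposes A's single interleaved loop into two passes (scan lines to structured
-- tokens, then render the tokens); same return value, objective: alternative decomposition.

-- ===== PORT A =====
-- helper shared by both Pythons (both Source A and Source B define it verbatim)
def convert_gql_type_to_prisma (gql_type : String) : String :=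
  PySem.Dict.getD (PySem.Dict.ofList
    [("String", "String"), ("Int", "Int"), ("Float", "Float"), ("Boolean", "Boolean"),
     ("ID", "String @id"), ("DateTime", "DateTime"), ("JSONString", "Json"),
     ("Decimal", "Decimal"), ("Upload", "String")]) gql_type "String"

-- hand port of Python's s.rstrip('!') (PySem has no right-strip with a chars argument):
-- exact — removes exactly the trailing '!' characters, as Python does for the set {'!'}
def rstripBang (s : String) : String := String.ofList ((s.toList.reverse.dropWhile (· == '!')).reverse)

-- Python truthiness of the current_type variable (None or a str; falsy = None or '')
def pyTruthy (ct : Option String) : Bool := match ct with | none => false | some s => !s.toList.isEmpty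

def header1 : String := "generator client {\n  provider = \"prisma-client-js\"\n}\n"
def header2 : String := "datasource db {\n  provider = \"postgresql\"\n  url = env(\"DATABASE_URL\")\n}\n"

-- loop body of A (state: prisma_schema list, current_type)
-- split(' implements ')[0] and split(':')[i] never raise (split returns a non-empty list
-- of the right length where indexed), so the pyGetD defaults are never used
def stepA (st : List String × Option String) (rawline : String) : List String × Option String :=
  let line := PySem.Str.strip rawline
  if line.toList.isEmpty || PySem.Str.startswith line "\"\"\"" then st
  else if PySem.Str.startswith line "type " && PySem.Str.isIn " implements " line then
    let type_name := PySem.Str.strip (PySem.Str.replace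
        (PySem.List.pyGetD ((PySem.Str.split? line " implements ").getD []) 0 "") "type " "")
    (st.1 ++ ["model " ++ type_name ++ " {"], some ("model " ++ type_name ++ " {"))
  else if PySem.Str.startswith line "type " then
    let type_name := PySem.Str.strip (PySem.Str.replace (PySem.Str.replace line "type " "") " {" "")
    (st.1 ++ ["model " ++ type_name ++ " {"], some ("model " ++ type_name ++ " {"))
  else if PySem.Str.startswith line "enum " then
    let enum_name := PySem.Str.strip (PySem.Str.replace (PySem.Str.replace line "enum " "") " {" "")
    (st.1 ++ ["enum " ++ enum_name ++ " {"], some ("enum " ++ enum_name ++ " {"))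
  else if pyTruthy st.2 && !(PySem.Str.strip line).toList.isEmpty && !PySem.Str.startswith line "}" then
    if PySem.Str.isIn "\"\"\"" line || PySem.Str.isIn "@" line then st
    else
      let field_parts := (PySem.Str.split? line ":").getD []
      if field_parts.length == 2 then
        let field_name := PySem.Str.strip (PySem.List.pyGetD field_parts 0 "")
        let field_type := rstripBang (PySem.Str.strip (PySem.List.pyGetD field_parts 1 ""))
        if PySem.Str.startswith field_type "[" && PySem.Str.endswith field_type "]" then
          let inner_type := rstripBang (PySem.Str.slice field_type (some 1) (some (-1)))
          (st.1 ++ ["  " ++ field_name ++ " " ++ convert_gql_type_to_prisma inner_type ++ "[]"], st.2)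
        else
          let prisma_type := convert_gql_type_to_prisma field_type
          let required := PySem.Str.isIn "!" (PySem.List.pyGetD field_parts 1 "")
          let prisma_field := "  " ++ field_name ++ " " ++ prisma_type
          (st.1 ++ [if required then prisma_field else prisma_field ++ "?"], st.2)
      else st
  else if PySem.Str.startswith line "}" then
    (st.1 ++ ["}", ""], none)
  else st

def parse_gql_schema (schema_content : String) : String :=
  PySem.Str.join "\n"
    (((PySem.Str.split? schema_content "\n").getD []).foldl stepA ([header1, header2], none)).1

-- ===== PORT B =====
inductive Tok
  | model (name : String)
  | enumDef (name : String)
  | listField (name inner : String)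
  | scalarField (name typ : String) (required : Bool)
  | close
deriving DecidableEq, Repr

-- pass 1: _scan_line — tokenize one stripped line
def tokOf (line : String) (open_type : Bool) : List Tok × Bool :=
  if line.toList.isEmpty || PySem.Str.startswith line "\"\"\"" then ([], open_type)
  else if PySem.Str.startswith line "type " && PySem.Str.isIn " implements " line then
    ([.model (PySem.Str.strip (PySem.Str.replace
        (PySem.List.pyGetD ((PySem.Str.split? line " implements ").getD []) 0 "") "type " ""))], true)
  else if PySem.Str.startswith line "type " then
    ([.model (PySem.Str.strip (PySem.Str.replace (PySem.Str.replace line "type " "") " {" ""))], true)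
  else if PySem.Str.startswith line "enum " then
    ([.enumDef (PySem.Str.strip (PySem.Str.replace (PySem.Str.replace line "enum " "") " {" ""))], true)
  else if open_type && !(PySem.Str.strip line).toList.isEmpty && !PySem.Str.startswith line "}" then
    if PySem.Str.isIn "\"\"\"" line || PySem.Str.isIn "@" line then ([], open_type)
    else
      let parts := (PySem.Str.split? line ":").getD []
      if parts.length == 2 then
        let name := PySem.Str.strip (PySem.List.pyGetD parts 0 "")
        let ftype := rstripBang (PySem.Str.strip (PySem.List.pyGetD parts 1 ""))
        if PySem.Str.startswith ftype "[" && PySem.Str.endswith ftype "]" then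
          ([.listField name (rstripBang (PySem.Str.slice ftype (some 1) (some (-1))))], open_type)
        else
          ([.scalarField name ftype (PySem.Str.isIn "!" (PySem.List.pyGetD parts 1 ""))], open_type)
      else ([], open_type)
  else if PySem.Str.startswith line "}" then ([.close], false)
  else ([], open_type)

-- pass 2: _render — one token to its output lines
def renderTok : Tok → List String
  | .model n => ["model " ++ n ++ " {"]
  | .enumDef n => ["enum " ++ n ++ " {"]
  | .listField n i => ["  " ++ n ++ " " ++ convert_gql_type_to_prisma i ++ "[]"]
  | .scalarField n t r =>
      let field := "  " ++ n ++ " " ++ convert_gql_type_to_prisma t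
      [if r then field else field ++ "?"]
  | .close => ["}", ""]

def stepB (st : List Tok × Bool) (rawline : String) : List Tok × Bool :=
  let r := tokOf (PySem.Str.strip rawline) st.2
  (st.1 ++ r.1, r.2)

def parse_gql_schema_alt (schema_content : String) : String :=
  let st := ((PySem.Str.split? schema_content "\n").getD []).foldl stepB ([], false)
  PySem.Str.join "\n" (st.1.foldl (fun acc t => acc ++ renderTok t) [header1, header2])

-- ===== PRECONDITION & SPEC =====
def Spec_parse_gql_schema (schema_content : String) (out : String) : Prop := out = parse_gql_schema_alt schema_content
instance (schema_content : String) (out : String) : Decidable (Spec_parse_gql_schema schema_content out) := by unfold Spec_parse_gql_schema; infer_instance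

-- ===== CLAIM (what is proved, stated in full; the proofs are below) =====
def Claim_equal_parse_gql_schema : Prop := ∀ (schema_content : String), Dom_parse_gql_schema schema_content → Spec_parse_gql_schema schema_content (parse_gql_schema schema_content)

-- ===== LEMMAS AND PROOFS =====

theorem stepA_fst (acc : List String) (ct : Option String) (l : String) :
    (stepA (acc, ct) l).1 = acc ++ ((tokOf (PySem.Str.strip l) (pyTruthy ct)).1).flatMap renderTok := by
  simp only [stepA, tokOf]
  split_ifs <;> simp_all [renderTok]

theorem stepA_snd (acc : List String) (ct : Option String) (l : String) :
    pyTruthy (stepA (acc, ct) l).2 = (tokOf (PySem.Str.strip l) (pyTruthy ct)).2 := by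
  simp only [stepA, tokOf]
  split_ifs <;> simp [pyTruthy, String.toList_append]

theorem stepB_shift (lines : List String) (toks : List Tok) (flag : Bool) :
    lines.foldl stepB (toks, flag) =
      (toks ++ (lines.foldl stepB ([], flag)).1, (lines.foldl stepB ([], flag)).2) := by
  induction lines generalizing toks flag with
  | nil => simp
  | cons l ls ih =>
    have hs : ∀ (tk : List Tok) (fl : Bool), stepB (tk, fl) l =
        (tk ++ (tokOf (PySem.Str.strip l) fl).1, (tokOf (PySem.Str.strip l) fl).2) := fun _ _ => rfl
    simp only [List.foldl_cons, hs, List.nil_append]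
    rw [ih, ih ((tokOf (PySem.Str.strip l) flag).1)]
    simp

theorem stepB_shift' (lines : List String) (st : List Tok × Bool) :
    lines.foldl stepB st =
      (st.1 ++ (lines.foldl stepB ([], st.2)).1, (lines.foldl stepB ([], st.2)).2) := by
  obtain ⟨toks, flag⟩ := st
  exact stepB_shift lines toks flag

theorem loop_eq (lines : List String) (acc : List String) (ct : Option String) :
    (lines.foldl stepA (acc, ct)).1 =
      acc ++ ((lines.foldl stepB ([], pyTruthy ct)).1).flatMap renderTok := by
  induction lines generalizing acc ct with
  | nil => simp
  | cons l ls ih =>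
    simp only [List.foldl_cons]
    have h1 : stepA (acc, ct) l = ((stepA (acc, ct) l).1, (stepA (acc, ct) l).2) := Prod.mk.eta.symm
    have h2 : stepB ([], pyTruthy ct) l =
        ((tokOf (PySem.Str.strip l) (pyTruthy ct)).1, (tokOf (PySem.Str.strip l) (pyTruthy ct)).2) := by
      simp [stepB]
    rw [h1, ih, h2, stepB_shift, stepA_fst, stepA_snd,
      stepB_shift' ls (tokOf (PySem.Str.strip l) (pyTruthy ct))]
    simp [List.flatMap_append]

-- ===== VERDICT (by name: the statement is the Claim_ definition above) =====
theorem parse_gql_schema_spec : Claim_equal_parse_gql_schema := by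
  intro s _
  show parse_gql_schema s = parse_gql_schema_alt s
  simp only [parse_gql_schema, parse_gql_schema_alt]
  rw [loop_eq, PySem.List.foldl_append_eq_flatMap]
  rfl
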